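-- pv_equiv track=rewrite | github.com/githubTB/jn_rag_new | extractor/excel_extractor.py | _fill_forward_header
-- ===== SOURCE A (Python) =====
-- def _fill_forward_header(row_map: dict[int, str], max_col: int) -> list[str]:
--     result: list[str] = []
--     current = ""
--     for col_idx in range(max_col):
--         value = row_map.get(col_idx, "").strip()
--         if value:
--             current = value
--         result.append(current)
--     return result
-- ===== SOURCE B (Python) =====
-- def _fill_forward_header(row_map: dict[int, str], max_col: int) -> list[str]:
--     n = max(max_col, 0)
--     keys = [k for k in sorted(set(row_map)) if 0 <= k < max_col]
--     filled = [(k, row_map.get(k, "").strip()) for k in keys]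
--     filled = [(k, v) for (k, v) in filled if v]
--     result = [""] * (filled[0][0] if filled else n)
--     for i, (p, v) in enumerate(filled):
--         nxt = filled[i + 1][0] if i + 1 < len(filled) else n
--         result += [v] * (nxt - p)
--     return result
-- ===== Notes on version B (the rewrite author's own statement) =====
-- stated objective: alternative
-- what changed: Instead of scanning every column while carrying a 'current' accumulator, B sorts the in-range non-blank keys of row_map and writes each stripped value across its whole run (from its position up to the next filled position) at once.
import Mathlib
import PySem

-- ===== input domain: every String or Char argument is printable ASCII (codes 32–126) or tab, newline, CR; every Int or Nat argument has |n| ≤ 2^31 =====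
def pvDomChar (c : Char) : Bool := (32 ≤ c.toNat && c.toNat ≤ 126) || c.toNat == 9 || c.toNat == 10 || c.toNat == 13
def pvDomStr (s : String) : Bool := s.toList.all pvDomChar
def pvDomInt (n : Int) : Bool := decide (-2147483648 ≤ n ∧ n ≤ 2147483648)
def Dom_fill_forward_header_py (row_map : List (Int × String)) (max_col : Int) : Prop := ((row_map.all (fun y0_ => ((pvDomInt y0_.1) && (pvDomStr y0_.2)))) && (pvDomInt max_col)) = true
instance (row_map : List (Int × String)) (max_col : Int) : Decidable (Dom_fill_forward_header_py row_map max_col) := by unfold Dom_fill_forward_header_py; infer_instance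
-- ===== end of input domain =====

-- B replaces A's per-column forward scan by sorting the filled key positions and writing each
-- value across its whole run at once (objective: alternative decomposition, same result).


-- ===== PORT A =====
def fill_forward_header_py (row_map : List (Int × String)) (max_col : Int) : List String :=
  ((PySem.List.pyRange 0 max_col 1).foldl
    (fun (st : List String × String) col_idx =>
      let value := PySem.Str.strip ((PySem.Dict.mk row_map).getD col_idx "")
      let current := if value ≠ "" then value else st.2
      (st.1 ++ [current], current))
    ([], "")).1

-- ===== PORT B =====
-- the while-loop of Source B: write each filled value from its position up to the next filled position (or n)
def ffh_segs (stop : Int) : List (Int × String) → List String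
  | [] => []
  | (p, v) :: rest =>
      let nxt := match rest with | [] => stop | (q, _) :: _ => q
      List.replicate (nxt - p).toNat v ++ ffh_segs stop rest

def fill_forward_header_py_alt (row_map : List (Int × String)) (max_col : Int) : List String :=
  let n := max max_col 0
  let keys := (PySem.List.sorted (PySem.Set.ofList (row_map.map Prod.fst)) (fun k => k) false).filter
      (fun k => decide (0 ≤ k) && decide (k < max_col))
  let filled := keys.map (fun k => (k, PySem.Str.strip ((PySem.Dict.mk row_map).getD k "")))
  let filled2 := filled.filter (fun kv => kv.2 ≠ "")
  List.replicate (match filled2 with | [] => n | (p, _) :: _ => p).toNat "" ++ ffh_segs n filled2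

-- ===== PRECONDITION & SPEC =====
def Spec_fill_forward_header_py (row_map : List (Int × String)) (max_col : Int) (out : List String) : Prop := out = fill_forward_header_py_alt row_map max_col
instance (row_map : List (Int × String)) (max_col : Int) (out : List String) : Decidable (Spec_fill_forward_header_py row_map max_col out) := by unfold Spec_fill_forward_header_py; infer_instance

-- ===== CLAIM (what is proved, stated in full; the proofs are below) =====
def Claim_equal_fill_forward_header_py : Prop := ∀ (row_map : List (Int × String)) (max_col : Int), Dom_fill_forward_header_py row_map max_col → Spec_fill_forward_header_py row_map max_col (fill_forward_header_py row_map max_col)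

-- ===== LEMMAS AND PROOFS =====

-- abbreviations used only by the proofs: the stripped value at a key, the sorted in-range keys,
-- and the list of filled (position, value) pairs B iterates over
def ffhVal (row_map : List (Int × String)) (k : Int) : String :=
  PySem.Str.strip ((PySem.Dict.mk row_map).getD k "")

def ffhKeys (row_map : List (Int × String)) (n : Int) : List Int :=
  (PySem.List.sorted (PySem.Set.ofList (row_map.map Prod.fst)) (fun k => k) false).filter
      (fun k => decide (0 ≤ k) && decide (k < n))

def ffhL (row_map : List (Int × String)) (n : Int) : List (Int × String) :=
  ((ffhKeys row_map n).map (fun k => (k, ffhVal row_map k))).filter (fun kv => kv.2 ≠ "")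

-- B restated in terms of the proof abbreviations
theorem ffh_alt_eq (row_map : List (Int × String)) (n : Int) :
    fill_forward_header_py_alt row_map n =
      List.replicate (match ffhL row_map n with | [] => max n 0 | (p, _) :: _ => p).toNat "" ++
        ffh_segs (max n 0) (ffhL row_map n) := rfl

-- A-side: fold invariant — the carried "current" is the last element written (or "")
theorem ffh_fold_snd (row_map : List (Int × String)) (l : List Int) (acc : List String) (c : String)
    (h : c = acc.getLastD "") :
    (l.foldl (fun (st : List String × String) col_idx =>
      let value := PySem.Str.strip ((PySem.Dict.mk row_map).getD col_idx "")
      let current := if value ≠ "" then value else st.2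
      (st.1 ++ [current], current)) (acc, c)).2
    = (l.foldl (fun (st : List String × String) col_idx =>
      let value := PySem.Str.strip ((PySem.Dict.mk row_map).getD col_idx "")
      let current := if value ≠ "" then value else st.2
      (st.1 ++ [current], current)) (acc, c)).1.getLastD "" := by
  induction l generalizing acc c with
  | nil => simpa using h
  | cons i t ih =>
    simp only [List.foldl_cons]
    exact ih _ _ (by simp)

-- A-side step: one more column appends one element
theorem ffh_A_succ (row_map : List (Int × String)) (m : Int) (hm : 0 ≤ m) :
    fill_forward_header_py row_map (m + 1) =
      fill_forward_header_py row_map m ++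
        [if ffhVal row_map m ≠ "" then ffhVal row_map m
         else (fill_forward_header_py row_map m).getLastD ""] := by
  unfold fill_forward_header_py
  rw [PySem.List.pyRange_one_succ_right (by omega), List.foldl_append]
  simp only [List.foldl_cons, List.foldl_nil]
  rw [ffh_fold_snd row_map _ [] "" (by simp)]
  simp [ffhVal]

-- a strictly increasing list filtered to [0, m+1) is the filter to [0, m) plus possibly m itself
theorem ffh_filter_succ (S : List Int) (hp : S.Pairwise (· < ·)) (m : Int) (hm : 0 ≤ m) :
    S.filter (fun k => decide (0 ≤ k) && decide (k < m + 1)) =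
      S.filter (fun k => decide (0 ≤ k) && decide (k < m)) ++ (if m ∈ S then [m] else []) := by
  induction S with
  | nil => simp
  | cons h t ih =>
    rw [List.pairwise_cons] at hp
    obtain ⟨hh, ht⟩ := hp
    rcases lt_trichotomy h m with hlt | rfl | hgt
    · have hc : (decide (0 ≤ h) && decide (h < m + 1)) = (decide (0 ≤ h) && decide (h < m)) := by
        by_cases h0 : 0 ≤ h <;> simp [h0] <;> omega
      have hm2 : (if m ∈ h :: t then [m] else ([] : List Int)) = (if m ∈ t then [m] else []) := by
        have hne : ¬ (m = h) := by omega
        simp [List.mem_cons, hne]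
      rw [List.filter_cons, List.filter_cons, hc, hm2, ih ht]
      by_cases hb : (decide (0 ≤ h) && decide (h < m)) = true <;> simp [hb]
    · have ht0 : t.filter (fun k => decide (0 ≤ k) && decide (k < h + 1)) = [] := by
        rw [List.filter_eq_nil_iff]; intro x hx
        have := hh x hx; simp; omega
      have ht1 : t.filter (fun k => decide (0 ≤ k) && decide (k < h)) = [] := by
        rw [List.filter_eq_nil_iff]; intro x hx
        have := hh x hx; simp; omega
      have hm2 : (if h ∈ h :: t then [h] else ([] : List Int)) = [h] := if_pos List.mem_cons_self
      rw [List.filter_cons, List.filter_cons, hm2, ht0, ht1]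
      have c1 : (decide (0 ≤ h) && decide (h < h + 1)) = true := by simp; omega
      have c0 : (decide (0 ≤ h) && decide (h < h)) = false := by simp
      rw [c1, c0]
      simp
    · have hm2 : (if m ∈ h :: t then [m] else ([] : List Int)) = [] := by
        apply if_neg
        simp only [List.mem_cons, not_or]
        constructor
        · omega
        · intro hmem; have := hh m hmem; omega
      have c1 : (decide (0 ≤ h) && decide (h < m + 1)) = false := by simp; omega
      have c0 : (decide (0 ≤ h) && decide (h < m)) = false := by simp; omega
      rw [List.filter_cons, List.filter_cons, hm2, c1, c0, ih ht]
      have : (if m ∈ t then [m] else ([] : List Int)) = [] := by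
        apply if_neg; intro hmem; have := hh m hmem; omega
      rw [this]
      simp

-- keys-filter step (sorted(set(...)) is strictly increasing)
theorem ffh_keys_succ (row_map : List (Int × String)) (m : Int) (hm : 0 ≤ m) :
    ffhKeys row_map (m + 1) =
      ffhKeys row_map m ++ (if m ∈ row_map.map Prod.fst then [m] else []) := by
  unfold ffhKeys
  rw [ffh_filter_succ _ (PySem.List.sorted_ofList_pairwise_lt _) m hm]
  congr 1
  by_cases hmem : m ∈ row_map.map Prod.fst
  · rw [if_pos hmem, if_pos]
    rw [PySem.List.mem_sorted]
    exact (PySem.Set.mem_ofList _ _).mpr hmem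
  · rw [if_neg hmem, if_neg]
    rw [PySem.List.mem_sorted]
    intro hc
    exact hmem ((PySem.Set.mem_ofList _ _).mp hc)

-- a key absent from the dict has the empty stripped value
theorem ffh_val_of_not_mem (row_map : List (Int × String)) (m : Int)
    (h : ¬ m ∈ row_map.map Prod.fst) : ffhVal row_map m = "" := by
  unfold ffhVal
  rw [PySem.Dict.getD_of_not_contains]
  · rfl
  · rw [Bool.eq_false_iff]
    rw [Ne, PySem.Dict.contains_iff_mem_keys]
    simpa [PySem.Dict.keys] using h

-- filled-list step
theorem ffh_L_succ (row_map : List (Int × String)) (m : Int) (hm : 0 ≤ m) :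
    ffhL row_map (m + 1) =
      ffhL row_map m ++ (if ffhVal row_map m ≠ "" then [(m, ffhVal row_map m)] else []) := by
  unfold ffhL
  rw [ffh_keys_succ row_map m hm, List.map_append, List.filter_append]
  congr 1
  by_cases hmem : m ∈ row_map.map Prod.fst
  · rw [if_pos hmem]
    simp [List.filter_cons]
  · rw [if_neg hmem]
    have := ffh_val_of_not_mem row_map m hmem
    simp [this]

-- every position in the filled list is in range
theorem ffh_L_bounds (row_map : List (Int × String)) (n : Int) :
    ∀ pv ∈ ffhL row_map n, 0 ≤ pv.1 ∧ pv.1 < n := by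
  intro pv hpv
  unfold ffhL ffhKeys at hpv
  rw [List.mem_filter] at hpv
  obtain ⟨hpv, -⟩ := hpv
  rw [List.mem_map] at hpv
  obtain ⟨k, hk, rfl⟩ := hpv
  rw [List.mem_filter] at hk
  obtain ⟨-, hk⟩ := hk
  simp at hk
  exact hk

-- the filled list is empty when no columns are requested
theorem ffh_L_nonpos (row_map : List (Int × String)) (n : Int) (hn : n ≤ 0) :
    ffhL row_map n = [] := by
  rw [List.eq_nil_iff_forall_not_mem]
  intro pv hpv
  have := ffh_L_bounds row_map n pv hpv
  omega

-- segment writer: appending a last filled position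
theorem ffh_segs_append (stop p : Int) (v : String) (l : List (Int × String)) :
    ffh_segs stop (l ++ [(p, v)]) = ffh_segs p l ++ List.replicate (stop - p).toNat v := by
  induction l with
  | nil => simp [ffh_segs]
  | cons a t ih =>
    obtain ⟨q, w⟩ := a
    cases t with
    | nil => simp [ffh_segs]
    | cons b t' => simpa [ffh_segs] using ih

-- segment writer: extending the stop by one appends the last value once
theorem ffh_segs_stop_succ (stop p : Int) (v : String) (l : List (Int × String)) (hb : p < stop) :
    ffh_segs (stop + 1) (l ++ [(p, v)]) = ffh_segs stop (l ++ [(p, v)]) ++ [v] := by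
  rw [ffh_segs_append, ffh_segs_append]
  have h1 : (stop + 1 - p).toNat = (stop - p).toNat + 1 := by omega
  rw [h1, List.replicate_succ', List.append_assoc]

-- last element of B's output is the last filled value
theorem ffh_segs_getLastD (stop p : Int) (v : String) (l : List (Int × String)) (hb : p < stop)
    (xs : List String) :
    (xs ++ ffh_segs stop (l ++ [(p, v)])).getLastD "" = v := by
  rw [ffh_segs_append]
  have h1 : (stop - p).toNat = (stop - 1 - p).toNat + 1 := by omega
  rw [h1, List.replicate_succ', ← List.append_assoc, ← List.append_assoc]
  simp

theorem ffh_getLastD_replicate (k : Nat) : (List.replicate k ("" : String)).getLastD "" = "" := by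
  cases k with
  | zero => rfl
  | succ n => simp [List.replicate_succ']

-- main induction on the (natural) number of columns
theorem ffh_main (row_map : List (Int × String)) (m : Nat) :
    fill_forward_header_py row_map (m : Int) = fill_forward_header_py_alt row_map (m : Int) := by
  induction m with
  | zero =>
    rw [ffh_alt_eq, ffh_L_nonpos row_map _ (by omega)]
    simp [fill_forward_header_py, PySem.List.pyRange_one_eq_nil, ffh_segs]
  | succ m ih =>
    have hcast : ((m + 1 : Nat) : Int) = (m : Int) + 1 := by push_cast; ring
    have hm : (0 : Int) ≤ (m : Int) := by positivity
    have hmax : max ((m : Int) + 1) 0 = (m : Int) + 1 := by omega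
    have hmaxm : max (m : Int) 0 = (m : Int) := by omega
    rw [hcast, ffh_A_succ row_map _ hm, ih, ffh_alt_eq, ffh_alt_eq, ffh_L_succ row_map m hm,
      hmax, hmaxm]
    by_cases hf : ffhVal row_map m ≠ ""
    · rw [if_pos hf, if_pos hf]
      rcases List.eq_nil_or_concat (ffhL row_map m) with hL | ⟨l', ⟨p, v⟩, hL⟩
      · rw [hL]
        simp only [List.nil_append, ffh_segs]
        simp
      · rw [hL, List.concat_eq_append, List.append_assoc]
        have hp : p < (m : Int) := by
          have := ffh_L_bounds row_map m (p, v) (by rw [hL]; simp)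
          exact this.2
        rw [show (l' ++ [(p, v)]) ++ [((m : Int), ffhVal row_map (m : Int))]
              = (l' ++ [(p, v)] ++ [((m : Int), ffhVal row_map (m : Int))]) from by simp,
          ffh_segs_append ((m : Int) + 1) (m : Int) (ffhVal row_map (m : Int)) (l' ++ [(p, v)])]
        have hhead : (match l' ++ [(p, v)] ++ [((m : Int), ffhVal row_map (m : Int))] with
            | [] => (m : Int) + 1 | (p, _) :: _ => p)
            = (match l' ++ [(p, v)] with | [] => (m : Int) | (p, _) :: _ => p) := by
          cases l' <;> simp
        rw [hhead]
        simp
    · rw [if_neg hf, if_neg hf, List.append_nil]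
      rcases List.eq_nil_or_concat (ffhL row_map m) with hL | ⟨l', ⟨p, v⟩, hL⟩
      · rw [hL]
        simp only [ffh_segs, List.append_nil]
        rw [ffh_getLastD_replicate]
        have : ((m : Int) + 1).toNat = (m : Int).toNat + 1 := by omega
        rw [this, List.replicate_succ']
      · rw [hL, List.concat_eq_append]
        have hp : p < (m : Int) := by
          have := ffh_L_bounds row_map m (p, v) (by rw [hL]; simp)
          exact this.2
        rw [ffh_segs_stop_succ (m : Int) p v l' hp]
        rw [ffh_segs_getLastD (m : Int) p v l' hp]
        cases l' <;> simp
-- ===== VERDICT (by name: the statement is the Claim_ definition above) =====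
theorem fill_forward_header_py_spec : Claim_equal_fill_forward_header_py := by
  intro row_map max_col _
  unfold Spec_fill_forward_header_py
  by_cases h : max_col ≤ 0
  · rw [ffh_alt_eq, ffh_L_nonpos row_map _ h]
    simp [fill_forward_header_py, PySem.List.pyRange_one_eq_nil h, ffh_segs,
      (by omega : max max_col 0 = 0)]
  · have : max_col = ((max_col.toNat : Nat) : Int) := by omega
    rw [this]
    exact ffh_main row_map max_col.toNat
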